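-- pv_equiv track=rewrite | github.com/ULTRAPROJECT-BUILD/ULTRAPROJECT | scripts/check_visual_spec_gate.py | aggregate_summary
-- ===== SOURCE A (Python) =====
-- from collections import Counter
-- from typing import Any, Callable, Iterable
--
-- def aggregate_summary(results: list[dict[str, Any]]) -> dict[str, int]:
--     counts = Counter(result["verdict"] for result in results)
--     return {
--         "total": len(results),
--         "passed": counts["pass"],
--         "failed": counts["fail"],
--         "skipped": counts["skipped"],
--         "errored": counts["error"],
--         "not_applicable": counts["not_applicable"],
--         "not_run_runtime_budget_exceeded": counts["not_run_runtime_budget_exceeded"],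
--     }
-- ===== SOURCE B (Python) =====
-- def _bisect_left(ys, v):
--     lo, hi = 0, len(ys)
--     while lo < hi:
--         mid = (lo + hi) // 2
--         if ys[mid] < v:
--             lo = mid + 1
--         else:
--             hi = mid
--     return lo
--
--
-- def _bisect_right(ys, v):
--     lo, hi = 0, len(ys)
--     while lo < hi:
--         mid = (lo + hi) // 2
--         if v < ys[mid]:
--             hi = mid
--         else:
--             lo = mid + 1
--     return lo
--
--
-- def aggregate_summary(results):
--     ys = sorted(result["verdict"] for result in results)
--
--     def count(v):
--         return _bisect_right(ys, v) - _bisect_left(ys, v)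
--
--     return {
--         "total": len(results),
--         "passed": count("pass"),
--         "failed": count("fail"),
--         "skipped": count("skipped"),
--         "errored": count("error"),
--         "not_applicable": count("not_applicable"),
--         "not_run_runtime_budget_exceeded": count("not_run_runtime_budget_exceeded"),
--     }
-- ===== Notes on version B (the rewrite author's own statement) =====
-- stated objective: alternative
-- what changed: Replaces the Counter hash index with sort-then-binary-search: the verdicts are sorted once and each category count is obtained as bisect_right minus bisect_left (hand-written binary searches) on the sorted list.
import Mathlib
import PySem

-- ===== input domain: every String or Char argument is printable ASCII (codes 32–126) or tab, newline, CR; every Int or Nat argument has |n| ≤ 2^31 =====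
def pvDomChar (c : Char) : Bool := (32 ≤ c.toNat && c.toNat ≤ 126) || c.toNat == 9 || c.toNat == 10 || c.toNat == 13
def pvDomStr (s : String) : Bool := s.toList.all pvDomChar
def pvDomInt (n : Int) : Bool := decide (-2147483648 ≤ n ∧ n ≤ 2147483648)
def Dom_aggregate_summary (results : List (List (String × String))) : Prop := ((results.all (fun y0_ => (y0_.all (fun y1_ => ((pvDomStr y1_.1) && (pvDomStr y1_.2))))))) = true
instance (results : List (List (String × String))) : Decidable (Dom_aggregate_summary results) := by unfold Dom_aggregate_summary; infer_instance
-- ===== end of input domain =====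

-- B replaces A's Counter index with sort-then-binary-search: the verdicts are sorted once and each
-- category count is bisect_right - bisect_left on the sorted list (alternative algorithm, not faster).
-- Pre_ excludes inputs containing a dict without a "verdict" key, on which A raises KeyError (B raises too).


-- ===== PORT A =====
-- Counter(result["verdict"] for result in results); the "verdict" lookup is total under Pre_ (get? is some there)
def aggregate_summary (results : List (List (String × String))) : List (String × Int) :=
  let counts : PySem.Dict String Int :=
    PySem.Dict.counter (results.map (fun result => (PySem.Dict.get? (PySem.Dict.mk result) "verdict").getD ""))
  [("total", (results.length : Int)),
   ("passed", counts.getD "pass" 0),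
   ("failed", counts.getD "fail" 0),
   ("skipped", counts.getD "skipped" 0),
   ("errored", counts.getD "error" 0),
   ("not_applicable", counts.getD "not_applicable" 0),
   ("not_run_runtime_budget_exceeded", counts.getD "not_run_runtime_budget_exceeded" 0)]

-- ===== PORT B =====
-- Python str comparison is lexicographic on code points: modelled on List Char with its lexicographic
-- LinearOrder (exact on the stated ASCII domain); the instance is the List Char linear order throughout.
-- _bisect_left / _bisect_right in Source B are verbatim the CPython bisect loops = PySem.List.bisectLeft/Right.
def pvVerdicts (results : List (List (String × String))) : List (List Char) :=
  results.map (fun result => ((PySem.Dict.get? (PySem.Dict.mk result) "verdict").getD "").toList)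

-- count(v) = _bisect_right(ys, v) - _bisect_left(ys, v)
def pvCount (ys : List (List Char)) (v : List Char) : Int :=
  (@PySem.List.bisectRight (List Char) List.instLinearOrder.toLT LinearOrder.toDecidableLT ys v : Int)
    - (@PySem.List.bisectLeft (List Char) List.instLinearOrder.toLT LinearOrder.toDecidableLT ys v : Int)

def aggregate_summary_alt (results : List (List (String × String))) : List (String × Int) :=
  let ys : List (List Char) :=
    @PySem.List.sorted (List Char) (List Char) List.instLinearOrder.toLT LinearOrder.toDecidableLT
      (pvVerdicts results) (fun x => x) false
  [("total", (results.length : Int)),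
   ("passed", pvCount ys "pass".toList),
   ("failed", pvCount ys "fail".toList),
   ("skipped", pvCount ys "skipped".toList),
   ("errored", pvCount ys "error".toList),
   ("not_applicable", pvCount ys "not_applicable".toList),
   ("not_run_runtime_budget_exceeded", pvCount ys "not_run_runtime_budget_exceeded".toList)]

-- ===== PRECONDITION & SPEC =====
-- Pre_ excludes inputs where some result dict lacks the "verdict" key (A raises KeyError there; so does B).
def Pre_aggregate_summary (results : List (List (String × String))) : Prop :=
  results.all (fun r => (PySem.Dict.get? (PySem.Dict.mk r) "verdict").isSome) = true
instance (results : List (List (String × String))) : Decidable (Pre_aggregate_summary results) := by unfold Pre_aggregate_summary; infer_instance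
def pvWitness_aggregate_summary : (List (List (String × String))) := [[("verdict", "pass")], [("verdict", "fail")]]

def Spec_aggregate_summary (results : List (List (String × String))) (out : List (String × Int)) : Prop := out = aggregate_summary_alt results
instance (results : List (List (String × String))) (out : List (String × Int)) : Decidable (Spec_aggregate_summary results out) := by unfold Spec_aggregate_summary; infer_instance

-- ===== CLAIM (what is proved, stated in full; the proofs are below) =====
def Claim_equal_aggregate_summary : Prop := ∀ (results : List (List (String × String))), Dom_aggregate_summary results → Pre_aggregate_summary results → Spec_aggregate_summary results (aggregate_summary results)

-- ===== LEMMAS AND PROOFS =====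

-- In a ≤-sorted list, a ≤-downward-closed predicate holds exactly on the first (countP p) positions.
theorem pv_countP_index {α : Type} [LinearOrder α] (p : α → Bool)
    (hmono : ∀ a b : α, a ≤ b → p b = true → p a = true) :
    ∀ (xs : List α), List.Pairwise (fun a b => a ≤ b) xs →
      ∀ (j : Nat) (hj : j < xs.length), (p xs[j] = true ↔ j < xs.countP p) := by
  intro xs
  induction xs with
  | nil => intro _ j hj; simp at hj
  | cons a t ih =>
    intro hp j hj
    rw [List.pairwise_cons] at hp
    by_cases hpa : p a = true
    · cases j with
      | zero => simp [hpa]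
      | succ k =>
        have hk : k < t.length := by simpa using hj
        have := ih hp.2 k hk
        simp only [List.getElem_cons_succ, List.countP_cons]
        rw [this]
        split <;> omega
    · have ht0 : t.countP p = 0 := by
        apply List.countP_eq_zero.mpr
        intro b hb hpb
        exact hpa (hmono a b (hp.1 b hb) hpb)
      have hc : (a :: t).countP p = 0 := by
        simp [ht0, hpa]
      rw [hc]
      cases j with
      | zero => simpa using hpa
      | succ k =>
        have hk : k < t.length := by simpa using hj
        simp only [List.getElem_cons_succ]
        constructor
        · intro hpb
          exact absurd (hpa ) (by
            have := hmono a (t[k]) (hp.1 _ (List.getElem_mem hk)) hpb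
            simp [this])
        · omega

-- The bisect_left loop returns c whenever (xs[j] < x ↔ j < c) and lo ≤ c ≤ hi ≤ |xs|, hi - lo ≤ fuel.
theorem pv_blLoop_eq (xs : List (List Char)) (x : List Char) (c : Nat)
    (hc : ∀ (j : Nat) (hj : j < xs.length), (xs[j] < x ↔ j < c)) :
    ∀ (fuel lo hi : Nat), lo ≤ c → c ≤ hi → hi ≤ xs.length → hi - lo ≤ fuel →
      @PySem.List.bisectLeftLoop (List Char) List.instLinearOrder.toLT LinearOrder.toDecidableLT
        xs x fuel lo hi = c := by
  intro fuel
  induction fuel with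
  | zero =>
    intro lo hi h1 h2 h3 h4
    simp only [PySem.List.bisectLeftLoop]
    omega
  | succ n ih =>
    intro lo hi h1 h2 h3 h4
    simp only [PySem.List.bisectLeftLoop]
    by_cases hlh : lo < hi
    · simp only [if_pos hlh]
      have hmid : (lo + hi) / 2 < xs.length := by omega
      rw [List.getElem?_eq_getElem hmid]
      by_cases hlt : xs[(lo + hi) / 2] < x
      · have := (hc _ hmid).mp hlt
        simp only [if_pos hlt]
        exact ih ((lo + hi) / 2 + 1) hi (by omega) h2 h3 (by omega)
      · have : ¬ ((lo + hi) / 2 < c) := fun hh => hlt ((hc _ hmid).mpr hh)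
        simp only [if_neg hlt]
        exact ih lo ((lo + hi) / 2) h1 (by omega) (by omega) (by omega)
    · simp only [if_neg hlh]; omega

-- The bisect_right loop returns c whenever (xs[j] ≤ x ↔ j < c) and lo ≤ c ≤ hi ≤ |xs|, hi - lo ≤ fuel.
theorem pv_brLoop_eq (xs : List (List Char)) (x : List Char) (c : Nat)
    (hc : ∀ (j : Nat) (hj : j < xs.length), (xs[j] ≤ x ↔ j < c)) :
    ∀ (fuel lo hi : Nat), lo ≤ c → c ≤ hi → hi ≤ xs.length → hi - lo ≤ fuel →
      @PySem.List.bisectRightLoop (List Char) List.instLinearOrder.toLT LinearOrder.toDecidableLT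
        xs x fuel lo hi = c := by
  intro fuel
  induction fuel with
  | zero =>
    intro lo hi h1 h2 h3 h4
    simp only [PySem.List.bisectRightLoop]
    omega
  | succ n ih =>
    intro lo hi h1 h2 h3 h4
    simp only [PySem.List.bisectRightLoop]
    by_cases hlh : lo < hi
    · simp only [if_pos hlh]
      have hmid : (lo + hi) / 2 < xs.length := by omega
      rw [List.getElem?_eq_getElem hmid]
      by_cases hlt : x < xs[(lo + hi) / 2]
      · have hnle : ¬ (xs[(lo + hi) / 2] ≤ x) := not_le.mpr hlt
        have : ¬ ((lo + hi) / 2 < c) := fun hh => hnle ((hc _ hmid).mpr hh)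
        simp only [if_pos hlt]
        exact ih lo ((lo + hi) / 2) h1 (by omega) (by omega) (by omega)
      · have hle : xs[(lo + hi) / 2] ≤ x := not_lt.mp hlt
        have := (hc _ hmid).mp hle
        simp only [if_neg hlt]
        exact ih ((lo + hi) / 2 + 1) hi (by omega) h2 h3 (by omega)
    · simp only [if_neg hlh]; omega

-- countP (≤ v) = countP (< v) + count v, on any list.
theorem pv_countP_le_split (v : List Char) :
    ∀ (ys : List (List Char)),
      ys.countP (fun y => decide (y ≤ v)) = ys.countP (fun y => decide (y < v)) + ys.count v := by
  intro ys
  induction ys with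
  | nil => simp
  | cons a t ih =>
    simp only [List.countP_cons, List.count_cons, ih]
    rcases lt_trichotomy a v with h | h | h
    · simp [le_of_lt h, h, ne_of_lt h]; omega
    · subst h; simp; omega
    · simp [not_le.mpr h, not_lt.mpr (le_of_lt h), ne_of_gt h]

-- For a sorted ys, bisect_right - bisect_left = count, hence pvCount counts v in the unsorted list.
theorem pv_pvCount_eq (zs : List (List Char)) (v : List Char) :
    pvCount (@PySem.List.sorted (List Char) (List Char) List.instLinearOrder.toLT
        LinearOrder.toDecidableLT zs (fun x => x) false) v = (zs.count v : Int) := by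
  set ys := @PySem.List.sorted (List Char) (List Char) List.instLinearOrder.toLT
      LinearOrder.toDecidableLT zs (fun x => x) false with hys
  have hpw : List.Pairwise (fun a b => a ≤ b) ys := PySem.List.sorted_pairwise zs (fun x => x)
  have hperm : ys.Perm zs := @PySem.List.sorted_perm (List Char) (List Char) List.instLinearOrder.toLT LinearOrder.toDecidableLT zs (fun x => x) false
  have hbl : @PySem.List.bisectLeft (List Char) List.instLinearOrder.toLT LinearOrder.toDecidableLT ys v
      = ys.countP (fun y => decide (y < v)) := by
    apply pv_blLoop_eq
    · intro j hj
      have := pv_countP_index (fun y => decide (y < v))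
        (fun a b hab hb => by simpa using lt_of_le_of_lt hab (by simpa using hb)) ys hpw j hj
      simpa using this
    · omega
    · exact List.countP_le_length
    · omega
    · omega
  have hbr : @PySem.List.bisectRight (List Char) List.instLinearOrder.toLT LinearOrder.toDecidableLT ys v
      = ys.countP (fun y => decide (y ≤ v)) := by
    apply pv_brLoop_eq
    · intro j hj
      have := pv_countP_index (fun y => decide (y ≤ v))
        (fun a b hab hb => by simpa using le_trans hab (by simpa using hb)) ys hpw j hj
      simpa using this
    · omega
    · exact List.countP_le_length
    · omega
    · omega
  have hsplit := pv_countP_le_split v ys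
  have hcnt : ys.count v = zs.count v := hperm.count_eq v
  unfold pvCount
  rw [hbl, hbr, ← hcnt]
  omega

-- counting a string in a list of strings = counting its char list in the mapped list
theorem pv_count_toList (vs : List String) (v : String) :
    (vs.map String.toList).count v.toList = vs.count v := by
  apply List.count_map_of_injective
  intro s t hst
  exact String.ext (by simpa [String.toList] using hst)

-- ===== VERDICT (by name: the statement is the Claim_ definition above) =====
theorem aggregate_summary_spec : Claim_equal_aggregate_summary := by
  intro results _ _
  unfold Spec_aggregate_summary aggregate_summary aggregate_summary_alt
  have hverd : pvVerdicts results
      = (results.map (fun result => (PySem.Dict.get? (PySem.Dict.mk result) "verdict").getD "")).map String.toList := by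
    simp [pvVerdicts]
  simp only [PySem.Dict.getD_counter, pv_pvCount_eq, hverd, pv_count_toList]
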